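-- pv_equiv track=rewrite | github.com/wikilinks/neleval | conll03_nel_eval/coref_metrics.py | pairwise_f1_old
-- ===== SOURCE A (Python) =====
-- import itertools
--
-- def sets_to_mapping(s):
--     """
--     >>> sorted(sets_to_mapping({1: {'a', 'c'}, 2: {'b'}}).items())
--     [('a', 1), ('b', 2), ('c', 1)]
--     """
--     return {m: k for k, ms in s.items() for m in ms}
--
-- def pairwise_f1_old(true, pred):
--     """Measure the proportion of correctly identified pairwise coindexations
--
--     TODO: tests
--     """
--     pred_mapping = sets_to_mapping(pred)
--     correct = 0
--     for cluster in true.values():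
--         for m1, m2 in itertools.combinations(cluster, 2):
--             if pred_mapping.get(m1) == pred_mapping.get(m2):
--                 correct += 1
--     p_den = sum(len(cluster) * (len(cluster) - 1) for cluster in pred.values()) * 2
--     r_den = sum(len(cluster) * (len(cluster) - 1) for cluster in true.values()) * 2
--     #return _prf(correct, p_den, correct, r_den)
--     return int(correct), int(p_den-correct), int(r_den-correct) # TODO ok for tp, fp, fn?
-- ===== SOURCE B (Python) =====
-- def pairwise_f1_old(true, pred):
--     """Pairwise coindexation tp/fp/fn via a single flat counter: every true
--     mention is keyed by (its true cluster id, its predicted cluster id), and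
--     correct = sum of c*(c-1)//2 over that one counter."""
--     pred_mapping = {m: k for k, ms in pred.items() for m in ms}
--     joint = {}
--     for tk, ms in true.items():
--         for m in ms:
--             key = (tk, pred_mapping.get(m))
--             joint[key] = joint.get(key, 0) + 1
--     correct = sum(c * (c - 1) // 2 for c in joint.values())
--     p_den = _pair_den(pred)
--     r_den = _pair_den(true)
--     return int(correct), int(p_den - correct), int(r_den - correct)
--
--
-- def _pair_den(d):
--     return 2 * sum(len(ms) * (len(ms) - 1) for ms in d.values())
-- ===== Notes on version B (the rewrite author's own statement) =====
-- stated objective: alternative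
-- what changed: B replaces the per-cluster enumeration of all pairs (itertools.combinations) by one flat counting dict keyed by (true cluster id, predicted label) over all mentions, then sums c*(c-1)//2 once over that counter; denominators move into a shared helper.
import Mathlib
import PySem

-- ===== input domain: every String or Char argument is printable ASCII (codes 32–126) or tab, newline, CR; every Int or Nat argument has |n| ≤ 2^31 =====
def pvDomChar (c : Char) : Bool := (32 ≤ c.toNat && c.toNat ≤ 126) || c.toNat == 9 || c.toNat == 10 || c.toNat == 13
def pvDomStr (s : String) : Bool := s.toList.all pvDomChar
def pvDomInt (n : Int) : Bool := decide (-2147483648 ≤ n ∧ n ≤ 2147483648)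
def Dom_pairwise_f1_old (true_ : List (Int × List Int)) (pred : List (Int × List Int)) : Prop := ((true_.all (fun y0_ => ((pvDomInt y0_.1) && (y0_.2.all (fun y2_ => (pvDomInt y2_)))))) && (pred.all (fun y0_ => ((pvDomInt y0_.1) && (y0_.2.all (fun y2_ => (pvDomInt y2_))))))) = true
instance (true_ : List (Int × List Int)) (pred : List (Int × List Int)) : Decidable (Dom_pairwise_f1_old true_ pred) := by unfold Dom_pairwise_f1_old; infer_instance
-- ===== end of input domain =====

-- ===== PORT A =====
-- B counts correct pairs with one flat counter keyed by (true cluster id, predicted label) instead of enumerating pairs per cluster; objective: alternative.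
def pairwise_f1_old (true_ : List (Int × List Int)) (pred : List (Int × List Int)) : Int × Int × Int :=
  let trueD := PySem.Dict.ofList true_
  let predD := PySem.Dict.ofList pred
  let pred_mapping : PySem.Dict Int Int :=
    predD.items.foldl (fun d p => p.2.foldl (fun d m => d.insert m p.1) d) PySem.Dict.empty
  let correct : Int :=
    trueD.values.foldl (fun acc cluster =>
      (PySem.List.combinations cluster 2).foldl (fun acc pair =>
        match pair with
        | [m1, m2] => if pred_mapping.get? m1 == pred_mapping.get? m2 then acc + 1 else acc
        | _ => acc) acc) 0
  let p_den : Int :=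
    (predD.values.map (fun cluster => (cluster.length : Int) * ((cluster.length : Int) - 1))).sum * 2
  let r_den : Int :=
    (trueD.values.map (fun cluster => (cluster.length : Int) * ((cluster.length : Int) - 1))).sum * 2
  (correct, p_den - correct, r_den - correct)

-- ===== PORT B =====
def pvPairDen (d : PySem.Dict Int (List Int)) : Int :=
  2 * (d.values.map (fun ms => (ms.length : Int) * ((ms.length : Int) - 1))).sum

def pairwise_f1_old_alt (true_ : List (Int × List Int)) (pred : List (Int × List Int)) : Int × Int × Int :=
  let trueD := PySem.Dict.ofList true_
  let predD := PySem.Dict.ofList pred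
  let pred_mapping : PySem.Dict Int Int :=
    PySem.Dict.ofList (predD.items.flatMap (fun p => p.2.map (fun m => (m, p.1))))
  let joint : PySem.Dict (Int × Option Int) Int :=
    trueD.items.foldl (fun j p =>
      p.2.foldl (fun j m =>
        let key := (p.1, pred_mapping.get? m)
        j.insert key (j.getD key 0 + 1)) j) PySem.Dict.empty
  let correct : Int :=
    (joint.values.map (fun c => PySem.Int.floordiv (c * (c - 1)) 2)).sum
  (correct, pvPairDen predD - correct, pvPairDen trueD - correct)

-- ===== PRECONDITION & SPEC =====
def Spec_pairwise_f1_old (true_ : List (Int × List Int)) (pred : List (Int × List Int)) (out : Int × Int × Int) : Prop := out = pairwise_f1_old_alt true_ pred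
instance (true_ : List (Int × List Int)) (pred : List (Int × List Int)) (out : Int × Int × Int) : Decidable (Spec_pairwise_f1_old true_ pred out) := by unfold Spec_pairwise_f1_old; infer_instance

-- ===== CLAIM (what is proved, stated in full; the proofs are below) =====
def Claim_equal_pairwise_f1_old : Prop := ∀ (true_ : List (Int × List Int)) (pred : List (Int × List Int)), Dom_pairwise_f1_old true_ pred → Spec_pairwise_f1_old true_ pred (pairwise_f1_old true_ pred)

-- ===== LEMMAS AND PROOFS =====

-- number of index pairs i < j with l[i] = l[j]
def npairs {α : Type} [BEq α] : List α → Nat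
  | [] => 0
  | a :: l => l.count a + npairs l

theorem floordiv_cast_choose (n : Nat) :
    PySem.Int.floordiv ((n : Int) * ((n : Int) - 1)) 2 = (n.choose 2 : Int) := by
  cases n with
  | zero => decide
  | succ m =>
    have h1 : ((m + 1 : Nat) : Int) * (((m + 1 : Nat) : Int) - 1) = (((m + 1) * m : Nat) : Int) := by
      push_cast; ring
    have h2 := PySem.Int.floordiv_natCast ((m + 1) * m) 2
    rw [h1, Nat.choose_two_right, Nat.add_sub_cancel]
    exact_mod_cast h2

-- A-side inner loop: the combinations fold counts coindexed pairs of the cluster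
theorem lemA (f : Int → Option Int) (xs : List Int) (acc : Int) :
    (PySem.List.combinations xs 2).foldl (fun acc pair =>
        match pair with
        | [m1, m2] => if f m1 == f m2 then acc + 1 else acc
        | _ => acc) acc = acc + (npairs (xs.map f) : Int) := by
  induction xs generalizing acc with
  | nil => simp [PySem.List.combinations_nil_succ, npairs]
  | cons x xs ih =>
    rw [show (2 : Nat) = 1 + 1 from rfl, PySem.List.combinations_cons_succ,
      PySem.List.combinations_one, List.map_map, List.foldl_append, List.foldl_map,
      show (1 + 1 : Nat) = 2 from rfl, ih]
    show List.foldl (fun (a : Int) (y : Int) => if f x == f y then a + 1 else a) acc xs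
        + (npairs (xs.map f) : Int) = acc + (npairs ((x :: xs).map f) : Int)
    rw [PySem.List.foldl_count_if (fun y => f x == f y) xs acc]
    have hc : xs.countP (fun y => f x == f y) = (xs.map f).count (f x) := by
      rw [List.count_eq_countP, List.countP_map]
      apply List.countP_congr
      intro y _
      simp only [Function.comp_apply]
      rw [Bool.beq_comm]
    simp only [List.map_cons, npairs, hc]
    push_cast
    ring

-- A-side outer loop
theorem lemA' (f : Int → Option Int) (vals : List (List Int)) (acc : Int) :
    vals.foldl (fun acc cluster =>
      (PySem.List.combinations cluster 2).foldl (fun acc pair =>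
        match pair with
        | [m1, m2] => if f m1 == f m2 then acc + 1 else acc
        | _ => acc) acc) acc
    = acc + (vals.map (fun c => (npairs (c.map f) : Int))).sum := by
  induction vals generalizing acc with
  | nil => simp
  | cons c vals ih =>
    rw [List.foldl_cons, ih, lemA, List.map_cons, List.sum_cons]
    ring

theorem sumT {α : Type} [BEq α] [LawfulBEq α] (S : List α) (hS : S.Nodup) (l : List α)
    (hl : ∀ x ∈ l, x ∈ S) :
    (S.map (fun k => ((l.count k).choose 2 : Int))).sum = (npairs l : Int) := by
  induction l with
  | nil => simp [npairs]
  | cons a l ih =>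
    have haS : a ∈ S := hl a (by simp)
    obtain ⟨S1, S2, rfl⟩ := List.append_of_mem haS
    have hnd := hS
    rw [List.nodup_append] at hnd
    have haS1 : a ∉ S1 := fun h => hnd.2.2 a h a List.mem_cons_self rfl
    have haS2 : a ∉ S2 := by
      have := hnd.2.1
      rw [List.nodup_cons] at this
      exact this.1
    have e1 : S1.map (fun k => (((a :: l).count k).choose 2 : Int))
        = S1.map (fun k => ((l.count k).choose 2 : Int)) := by
      apply List.map_congr_left
      intro k hk
      have hne : ¬ (a == k) = true := by
        simp only [beq_iff_eq]; rintro rfl; exact haS1 hk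
      simp [List.count_cons, hne]
    have e2 : S2.map (fun k => (((a :: l).count k).choose 2 : Int))
        = S2.map (fun k => ((l.count k).choose 2 : Int)) := by
      apply List.map_congr_left
      intro k hk
      have hne : ¬ (a == k) = true := by
        simp only [beq_iff_eq]; rintro rfl; exact haS2 hk
      simp [List.count_cons, hne]
    have ea : (((a :: l).count a).choose 2 : Nat) = l.count a + (l.count a).choose 2 := by
      have : (a :: l).count a = l.count a + 1 := by simp
      rw [this, Nat.choose_succ_succ, Nat.choose_one_right]
    have ihl := ih (fun x hx => hl x (List.mem_cons_of_mem a hx))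
    rw [List.map_append, List.sum_append, List.map_cons, List.sum_cons] at ihl ⊢
    rw [e1, e2, ea]
    push_cast
    simp only [npairs]
    push_cast
    omega

-- B-side counter: summing c*(c-1)//2 over Counter(l) counts the equal pairs of l
theorem lemB {α : Type} [BEq α] [LawfulBEq α] (l : List α) :
    (((PySem.Dict.counter l).values.map
        (fun c => PySem.Int.floordiv (c * (c - 1)) 2)).sum) = (npairs l : Int) := by
  rw [PySem.Dict.values, PySem.Dict.items_counter, List.map_map, List.map_map]
  refine Eq.trans (congrArg List.sum (List.map_congr_left (fun k _ => ?_)))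
    (sumT (PySem.Set.ofList l) (PySem.Set.nodup_ofList _) l
      (fun x hx => (PySem.Set.mem_ofList _ _).mpr hx))
  simpa using floordiv_cast_choose (l.count k)

-- a nested fold over dict items is the fold over the flattened pair list
theorem foldl_nested_flatMap {α β σ : Type} (g : α → List β) (f : σ → β → σ)
    (l : List α) (init : σ) :
    l.foldl (fun s a => (g a).foldl f s) init = (l.flatMap g).foldl f init := by
  induction l generalizing init with
  | nil => simp
  | cons a l ih => simp [List.foldl_append, ih]

theorem npairs_append {α : Type} [BEq α] [LawfulBEq α] (l1 l2 : List α)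
    (h : ∀ a ∈ l1, a ∉ l2) :
    npairs (l1 ++ l2) = npairs l1 + npairs l2 := by
  induction l1 with
  | nil => simp [npairs]
  | cons a l1 ih =>
    simp only [List.cons_append, npairs, List.count_append]
    rw [List.count_eq_zero.mpr (h a (by simp)), ih (fun x hx => h x (List.mem_cons_of_mem a hx))]
    omega

theorem npairs_map_tag {α β : Type} [BEq α] [LawfulBEq α] [BEq β] [LawfulBEq β]
    (k : α) (l : List β) :
    npairs (l.map (fun x => (k, x))) = npairs l := by
  induction l with
  | nil => rfl
  | cons a l ih =>
    simp only [List.map_cons, npairs, ih]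
    congr 1
    clear ih
    induction l with
    | nil => rfl
    | cons b l ihl =>
      simp only [List.map_cons, List.count_cons, ihl]
      congr 1
      have : (((k, b) : α × β) == (k, a)) = (b == a) := by
        by_cases hba : b = a
        · subst hba; simp
        · simp [hba]
      rw [this]

-- splitting the flat tagged mention list over clusters with distinct keys
theorem npairs_flat (f : Int → Option Int) (items : List (Int × List Int))
    (h : (items.map (·.1)).Nodup) :
    (npairs (items.flatMap (fun p => p.2.map (fun m => (p.1, f m)))) : Int)
    = ((items.map (fun p => (npairs (p.2.map f) : Int)))).sum := by
  induction items with
  | nil => simp [npairs]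
  | cons p items ih =>
    simp only [List.map_cons, List.nodup_cons] at h
    rw [List.flatMap_cons, npairs_append, List.map_cons, List.sum_cons, ← ih h.2]
    · push_cast
      have hhead : p.2.map (fun m => (p.1, f m)) = (p.2.map f).map (fun x => (p.1, x)) := by
        rw [List.map_map]; rfl
      rw [hhead, npairs_map_tag]
    · rintro a ha hb
      obtain ⟨m, _, rfl⟩ := List.mem_map.mp ha
      obtain ⟨q, hq, hqa⟩ := List.mem_flatMap.mp hb
      obtain ⟨m', _, h'⟩ := List.mem_map.mp hqa
      apply h.1
      have : q.1 = p.1 := by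
        have := congrArg Prod.fst h'
        simpa using this
      rw [← this]
      exact List.mem_map.mpr ⟨q, hq, rfl⟩

-- the two constructions of pred_mapping build the same dict
theorem pred_mapping_eq (pred : List (Int × List Int)) :
    (PySem.Dict.ofList pred).items.foldl
        (fun d p => p.2.foldl (fun d m => d.insert m p.1) d) (PySem.Dict.empty : PySem.Dict Int Int)
    = PySem.Dict.ofList ((PySem.Dict.ofList pred).items.flatMap (fun p => p.2.map (fun m => (m, p.1)))) := by
  show _ = ((PySem.Dict.ofList pred).items.flatMap (fun p => p.2.map (fun m => (m, p.1)))).foldl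
      (fun d q => d.insert q.1 q.2) PySem.Dict.empty
  rw [← foldl_nested_flatMap]
  apply List.foldl_ext
  intro d p _
  rw [List.foldl_map]

-- the whole 'correct' computation agrees
theorem correct_eq (pm : PySem.Dict Int Int) (trueD : PySem.Dict Int (List Int))
    (hnd : trueD.keys.Nodup) :
    trueD.values.foldl (fun acc cluster =>
      (PySem.List.combinations cluster 2).foldl (fun acc pair =>
        match pair with
        | [m1, m2] => if pm.get? m1 == pm.get? m2 then acc + 1 else acc
        | _ => acc) acc) 0
    = ((trueD.items.foldl (fun j p =>
        p.2.foldl (fun j m =>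
          let key := (p.1, pm.get? m)
          j.insert key (j.getD key 0 + 1)) j) (PySem.Dict.empty : PySem.Dict (Int × Option Int) Int)).values.map
        (fun c => PySem.Int.floordiv (c * (c - 1)) 2)).sum := by
  have hjoint : trueD.items.foldl (fun j p =>
        p.2.foldl (fun j m =>
          let key := (p.1, pm.get? m)
          j.insert key (j.getD key 0 + 1)) j) (PySem.Dict.empty : PySem.Dict (Int × Option Int) Int)
      = PySem.Dict.counter (trueD.items.flatMap (fun p => p.2.map (fun m => (p.1, pm.get? m)))) := by
    rw [← PySem.Dict.foldl_insert_getD_add_one_eq_counter, ← foldl_nested_flatMap]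
    apply List.foldl_ext
    intro d p _
    rw [List.foldl_map]
  rw [hjoint, lemB, npairs_flat _ _ hnd, lemA' (fun m => pm.get? m) trueD.values 0, zero_add,
    PySem.Dict.values]
  rw [List.map_map]
  rfl

-- ===== VERDICT (by name: the statement is the Claim_ definition above) =====
theorem pairwise_f1_old_spec : Claim_equal_pairwise_f1_old := by
  intro true_ pred _
  unfold Spec_pairwise_f1_old pairwise_f1_old pairwise_f1_old_alt pvPairDen
  simp only []
  rw [← pred_mapping_eq, correct_eq _ _ (PySem.Dict.nodup_keys_ofList true_)]
  ring_nf
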